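-- pv_equiv track=rewrite | github.com/gyang274/leetcode | src/1432.max.difference.replace.digits.py | xmax
-- ===== SOURCE A (Python) =====
-- def xmax(num):
--   x, s = list(map(int, str(num))), None
--   for i in range(len(x)):
--     if s is None:
--       if x[i] < 9:
--         s = x[i]
--         x[i] = 9
--     else:
--       if x[i] == s:
--         x[i] = 9
--   return int(''.join(map(str, x)))
-- ===== SOURCE B (Python) =====
-- def _target(n):
--   # most significant digit of n that is < 9, else None
--   q, r = divmod(n, 10)
--   d = _target(q) if q > 0 else None
--   return d if d is not None else (r if r < 9 else None)
--
-- def _places(n, d):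
--   # sum of 10**i over the positions i of n whose digit is d
--   q, r = divmod(n, 10)
--   return (1 if r == d else 0) + 10 * (_places(q, d) if q > 0 else 0)
--
-- def xmax(num):
--   d = _target(num)
--   return num if d is None else num + (9 - d) * _places(num, d)
-- ===== Notes on version B (the rewrite author's own statement) =====
-- stated objective: alternative
-- what changed: B never builds the digit string: it works purely arithmetically via divmod recursion, finding the most significant digit below 9 and adding (9-d) times the sum of the place values where that digit occurs, instead of A's string-to-digit-list rewrite-and-rejoin
import Mathlib
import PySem

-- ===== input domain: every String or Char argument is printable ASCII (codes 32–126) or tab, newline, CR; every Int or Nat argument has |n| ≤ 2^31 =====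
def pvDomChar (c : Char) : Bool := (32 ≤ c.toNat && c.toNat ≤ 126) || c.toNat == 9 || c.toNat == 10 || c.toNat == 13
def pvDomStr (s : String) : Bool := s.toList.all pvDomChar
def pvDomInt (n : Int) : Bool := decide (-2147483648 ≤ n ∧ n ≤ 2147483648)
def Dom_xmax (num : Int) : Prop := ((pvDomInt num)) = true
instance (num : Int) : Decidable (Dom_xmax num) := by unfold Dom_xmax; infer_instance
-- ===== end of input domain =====

-- B drops A's string round-trip entirely: it works by divmod arithmetic on the number
-- (find the most significant digit below 9, then add (9-d) times the sum of the place
-- values holding that digit); equivalence of return values is proved for num ≥ 0.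

-- ===== PORT A =====
-- x = list(map(int, str(num)))  (exact on Pre_: for num ≥ 0 every character of str(num) is a digit)
def pvDigits (num : Int) : List Int :=
  (PySem.Int.toChars num).map (fun c => ((c.toNat : Int) - 48))

-- int(''.join(map(str, x)))  on a digit list (exact for digits 0–9)
def pvJoinInt (xs : List Int) : Int := xs.foldl (fun r d => 10 * r + d) 0

-- A's loop over indices with mutable state s, transcribed as structural recursion over the list
def xmaxLoop : List Int → Option Int → List Int
  | [], _ => []
  | v :: t, none => if v < 9 then 9 :: xmaxLoop t (some v) else v :: xmaxLoop t none
  | v :: t, some s => (if v = s then 9 else v) :: xmaxLoop t (some s)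

def xmax (num : Int) : Int :=
  pvJoinInt (xmaxLoop (pvDigits num) none)

-- ===== PORT B =====
-- _target(n): most significant digit of n that is < 9, else None  (q, r = divmod(n, 10))
def pvTarget (n : Int) : Option Int :=
  let q := PySem.Int.floordiv n 10
  let r := PySem.Int.mod n 10
  match (if 0 < q then pvTarget q else none) with
  | some d => some d
  | none => if r < 9 then some r else none
termination_by n.toNat
decreasing_by
  have h1 := PySem.Int.floordiv_mul_add_mod n 10
  have h2 := PySem.Int.mod_nonneg n (b := 10) (by omega)
  have h3 := PySem.Int.mod_lt n (b := 10) (by omega)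
  omega

-- _places(n, d): sum of 10**i over the positions i of n whose digit is d
def pvPlaces (n : Int) (d : Int) : Int :=
  let q := PySem.Int.floordiv n 10
  let r := PySem.Int.mod n 10
  (if r = d then 1 else 0) + 10 * (if 0 < q then pvPlaces q d else 0)
termination_by n.toNat
decreasing_by
  have h1 := PySem.Int.floordiv_mul_add_mod n 10
  have h2 := PySem.Int.mod_nonneg n (b := 10) (by omega)
  have h3 := PySem.Int.mod_lt n (b := 10) (by omega)
  omega

def xmax_alt (num : Int) : Int :=
  match pvTarget num with
  | none => num
  | some d => num + (9 - d) * pvPlaces num d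

-- ===== PRECONDITION & SPEC =====
-- Pre_ excludes negative num, on which A raises ValueError (int('-') inside map(int, str(num))).
def Pre_xmax (num : Int) : Prop := 0 ≤ num
instance (num : Int) : Decidable (Pre_xmax num) := by unfold Pre_xmax; infer_instance
def pvWitness_xmax : Int := (1432)
def Spec_xmax (num : Int) (out : Int) : Prop := out = xmax_alt num
instance (num : Int) (out : Int) : Decidable (Spec_xmax num out) := by unfold Spec_xmax; infer_instance

-- ===== CLAIM (what is proved, stated in full; the proofs are below) =====
def Claim_equal_xmax : Prop := ∀ (num : Int), Dom_xmax num → Pre_xmax num → Spec_xmax num (xmax num)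

-- ===== LEMMAS AND PROOFS =====

-- ---- A-side characterisation: the loop is "replace every occurrence of the first digit < 9 by 9"

theorem xmaxLoop_some (t : List Int) (s : Int) :
    xmaxLoop t (some s) = t.map (fun v => if v = s then 9 else v) := by
  induction t with
  | nil => rfl
  | cons v t ih => simp [xmaxLoop, ih]

theorem xmaxLoop_none (xs : List Int) :
    xmaxLoop xs none =
      xs.map (fun v => if some v = xs.find? (fun v => v < 9) then 9 else v) := by
  induction xs with
  | nil => rfl
  | cons v t ih =>
    by_cases h : v < 9
    · simp only [xmaxLoop, if_pos h, List.find?_cons, decide_eq_true h]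
      simp [xmaxLoop_some]
    · have hne : decide (v < 9) = false := by simpa using h
      simp only [xmaxLoop, if_neg h, List.find?_cons, hne]
      rw [ih]
      simp only [List.map_cons]
      congr 1
      have : some v ≠ t.find? (fun v => v < 9) := by
        intro he
        have := List.find?_some he.symm
        simp at this
        omega
      simp [this]

-- ---- the digit list of a natural number, most significant first (proof-side spec)

def digitsInt (n : Nat) : List Int :=
  if n < 10 then [(n : Int)] else digitsInt (n / 10) ++ [((n % 10 : Nat) : Int)]
decreasing_by omega

def charsOf (n : Nat) : List Char :=
  if n < 10 then [Nat.digitChar n] else charsOf (n / 10) ++ [Nat.digitChar (n % 10)]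
decreasing_by omega

theorem toDigitsCore_eq (fuel : Nat) :
    ∀ n ds, n < fuel → Nat.toDigitsCore 10 fuel n ds = charsOf n ++ ds := by
  induction fuel with
  | zero => intro n ds h; omega
  | succ fuel ih =>
    intro n ds h
    by_cases h10 : n < 10
    · have hq : n / 10 = 0 := by omega
      rw [Nat.toDigitsCore, charsOf]
      simp [hq, h10, Nat.mod_eq_of_lt h10]
    · have hq : ¬ n / 10 = 0 := by omega
      rw [Nat.toDigitsCore, charsOf]
      simp only [hq, if_neg h10]
      rw [ih (n / 10) _ (by omega)]
      simp

theorem pvDigits_eq (num : Int) (h : 0 ≤ num) :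
    pvDigits num = digitsInt num.toNat := by
  have hchars : PySem.Int.toChars num = charsOf num.toNat := by
    rw [PySem.Int.toChars]
    rw [if_neg (by omega)]
    rw [Nat.toDigits, toDigitsCore_eq (num.toNat + 1) num.toNat [] (by omega)]
    simp
  rw [pvDigits, hchars]
  have key : ∀ m : Nat, (charsOf m).map (fun c => ((c.toNat : Int) - 48)) = digitsInt m := by
    intro m
    induction m using Nat.strong_induction_on with
    | _ m ih =>
      rw [charsOf, digitsInt]
      by_cases hm : m < 10
      · simp only [if_pos hm, List.map_cons, List.map_nil]
        congr 1
        interval_cases m <;> norm_num [Nat.digitChar] <;> decide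
      · simp only [if_neg hm, List.map_append, List.map_cons, List.map_nil]
        rw [ih (m / 10) (by omega)]
        congr 2
        have : m % 10 < 10 := by omega
        have h10 : m % 10 < 10 := by omega
        interval_cases h : m % 10 <;> norm_num [Nat.digitChar] <;> decide
  exact key num.toNat

-- ---- joining digits back to the number

theorem pvJoinInt_singleton (d : Int) : pvJoinInt [d] = d := by
  simp [pvJoinInt]

theorem pvJoinInt_append (xs : List Int) (d : Int) :
    pvJoinInt (xs ++ [d]) = 10 * pvJoinInt xs + d := by
  simp [pvJoinInt, List.foldl_append]

theorem pvJoinInt_digitsInt (n : Nat) : pvJoinInt (digitsInt n) = (n : Int) := by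
  induction n using Nat.strong_induction_on with
  | _ n ih =>
    rw [digitsInt]
    by_cases hn : n < 10
    · simp [pvJoinInt, hn]
    · rw [if_neg hn, pvJoinInt_append, ih (n / 10) (by omega)]
      push_cast
      omega

-- ---- evaluating B's divmod on a cast natural number

theorem floordiv_cast (n : Nat) : PySem.Int.floordiv (n : Int) 10 = ((n / 10 : Nat) : Int) := by
  exact_mod_cast PySem.Int.floordiv_natCast n 10

theorem mod_cast10 (n : Nat) : PySem.Int.mod (n : Int) 10 = ((n % 10 : Nat) : Int) := by
  exact_mod_cast PySem.Int.mod_natCast n 10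

-- ---- B's _target finds the first digit < 9

theorem pvTarget_eq (n : Nat) :
    pvTarget (n : Int) = (digitsInt n).find? (fun v => v < 9) := by
  induction n using Nat.strong_induction_on with
  | _ n ih =>
    rw [pvTarget, digitsInt]
    simp only [floordiv_cast, mod_cast10]
    by_cases hn : n < 10
    · have hq : n / 10 = 0 := by omega
      have hr : n % 10 = n := Nat.mod_eq_of_lt hn
      simp only [hq, hr, if_pos hn]
      by_cases h9 : (n : Int) < 9 <;> simp [List.find?, h9]
    · have hq : (0 : Int) < ((n / 10 : Nat) : Int) := by
        have : 0 < n / 10 := by omega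
        exact_mod_cast this
      rw [if_pos hq, if_neg hn, ih (n / 10) (by omega), List.find?_append]
      cases hfind : (digitsInt (n / 10)).find? (fun v => v < 9) with
      | some d => simp
      | none =>
        simp only [List.find?_cons, List.find?_nil]
        split
        · simp_all
        · next h =>
          have h' : ¬ ((n : Int) % 10 < 9) := by omega
          simp [h']

-- ---- replacing digit d by 9 adds (9 - d) at every place holding d

theorem join_map_eq (n : Nat) (d : Int) :
    pvJoinInt ((digitsInt n).map (fun v => if v = d then 9 else v)) =
      (n : Int) + (9 - d) * pvPlaces (n : Int) d := by
  induction n using Nat.strong_induction_on with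
  | _ n ih =>
    rw [pvPlaces, digitsInt]
    simp only [floordiv_cast, mod_cast10]
    by_cases hn : n < 10
    · have hq : n / 10 = 0 := by omega
      have hr : n % 10 = n := Nat.mod_eq_of_lt hn
      simp only [hq, hr, if_pos hn, List.map_cons, List.map_nil, Nat.cast_zero, lt_irrefl, if_false, mul_zero, add_zero]
      by_cases hd : (n : Int) = d
      · rw [hd, if_pos rfl, if_pos rfl, pvJoinInt_singleton]; ring
      · rw [if_neg hd, if_neg hd, pvJoinInt_singleton]; ring
    · have hq : (0 : Int) < ((n / 10 : Nat) : Int) := by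
        have : 0 < n / 10 := by omega
        exact_mod_cast this
      have hsplit : (n : Int) = 10 * ((n / 10 : Nat) : Int) + ((n % 10 : Nat) : Int) := by
        push_cast; omega
      rw [if_neg hn, if_pos hq, List.map_append, List.map_cons, List.map_nil,
        pvJoinInt_append, ih (n / 10) (by omega), hsplit]
      by_cases hd : ((n % 10 : Nat) : Int) = d
      · rw [hd, if_pos rfl, if_pos rfl]; ring
      · rw [if_neg hd, if_neg hd]; ring

-- ===== VERDICT (by name: the statement is the Claim_ definition above) =====
theorem xmax_spec : Claim_equal_xmax := by
  intro num _ hpre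
  have h0 : 0 ≤ num := hpre
  obtain ⟨n, rfl⟩ : ∃ m : Nat, num = (m : Int) := ⟨num.toNat, by omega⟩
  unfold Spec_xmax xmax xmax_alt
  rw [pvDigits_eq _ h0, Int.toNat_natCast, xmaxLoop_none, pvTarget_eq n]
  cases hfind : (digitsInt n).find? (fun v => v < 9) with
  | none =>
    simpa using pvJoinInt_digitsInt n
  | some d =>
    simp only [Option.some.injEq]
    exact join_map_eq n d
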